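-- pv_equiv track=rewrite | github.com/idelaniyariets/templates-for-inf_ege | solutions/n_9/17863.py | chpovt
-- ===== SOURCE A (Python) =====
-- def chpovt(line):
--     dts = []
--     pv = 1
--     for el in line:
--         dts.append(line.count(el))
--     for el in dts:
--         pv *= int(el)
--     if pv == 27:
--         return True
--     else:
--         return False
-- ===== SOURCE B (Python) =====
-- def chpovt(line):
--     counts = {}
--     for ch in line:
--         counts[ch] = counts.get(ch, 0) + 1
--     pv = 1
--     for c in counts.values():
--         pv *= c ** c
--     return pv == 27
-- ===== Notes on version B (the rewrite author's own statement) =====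
-- stated objective: faster
-- what changed: B builds a character-count dictionary in one pass and multiplies count**count per distinct character, instead of A's per-character line.count rescans.
import Mathlib
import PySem

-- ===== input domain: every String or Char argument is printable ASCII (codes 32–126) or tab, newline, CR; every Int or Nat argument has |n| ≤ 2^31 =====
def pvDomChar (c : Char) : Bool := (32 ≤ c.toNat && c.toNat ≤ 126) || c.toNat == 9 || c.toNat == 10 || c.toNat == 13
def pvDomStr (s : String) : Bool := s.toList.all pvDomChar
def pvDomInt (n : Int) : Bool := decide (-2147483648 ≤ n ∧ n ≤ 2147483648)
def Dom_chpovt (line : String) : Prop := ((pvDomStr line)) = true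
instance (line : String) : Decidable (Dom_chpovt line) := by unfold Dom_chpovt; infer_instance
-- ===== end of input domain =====

-- B replaces A's quadratic per-character line.count rescans by a one-pass count dictionary
-- and multiplies count**count per distinct character (objective: faster).

-- ===== PORT A =====
def chpovt (line : String) : Bool :=
  let dts : List Int :=
    line.toList.foldl (fun acc el => acc ++ [(line.toList.count el : Int)]) []
  let pv : Int := dts.foldl (fun pv el => pv * el) 1
  if pv == 27 then true else false

-- ===== PORT B =====
def chpovt_alt (line : String) : Bool :=
  let counts : PySem.Dict Char Int :=
    line.toList.foldl (fun d ch => d.insert ch (d.getD ch 0 + 1)) PySem.Dict.empty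
  let pv : Int := counts.values.foldl (fun pv c => pv * c ^ c.toNat) 1
  pv == 27

-- ===== PRECONDITION & SPEC =====
def Spec_chpovt (line : String) (out : Bool) : Prop := out = chpovt_alt line
instance (line : String) (out : Bool) : Decidable (Spec_chpovt line out) := by unfold Spec_chpovt; infer_instance

-- ===== CLAIM (what is proved, stated in full; the proofs are below) =====
def Claim_equal_chpovt : Prop := ∀ (line : String), Dom_chpovt line → Spec_chpovt line (chpovt line)

-- ===== LEMMAS AND PROOFS =====



-- regrouping: the product of g over all elements equals the product over the
-- distinct elements (first occurrences) of g x ^ (count x)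
theorem pv_prod_regroup (l : List Char) (g : Char → Int) :
    (l.map g).prod = ((PySem.Set.ofList l).map (fun x => g x ^ l.count x)).prod := by
  rw [Finset.prod_list_map_count]
  rw [← List.prod_toFinset (fun x => g x ^ l.count x) (PySem.Set.nodup_ofList l)]
  apply Finset.prod_congr _ (fun _ _ => rfl)
  ext x
  simp [PySem.Set.mem_ofList]

-- A's accumulation loop is the product of the list
theorem pv_foldl_mul (xs : List Int) (a : Int) :
    xs.foldl (fun pv el => pv * el) a = a * xs.prod := by
  induction xs generalizing a with
  | nil => simp
  | cons x xs ih => simp [ih, mul_assoc]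

-- B's accumulation loop is the product of c ^ c over the list
theorem pv_foldl_mul_pow (xs : List Int) (a : Int) :
    xs.foldl (fun pv c => pv * c ^ c.toNat) a = a * (xs.map (fun c => c ^ c.toNat)).prod := by
  induction xs generalizing a with
  | nil => simp
  | cons x xs ih => simp [ih, mul_assoc]

theorem chpovt_eq (line : String) : chpovt line = chpovt_alt line := by
  unfold chpovt chpovt_alt
  rw [PySem.Dict.foldl_insert_getD_add_one_eq_counter]
  simp only [PySem.List.foldl_append_singleton_eq_map, List.nil_append,
    PySem.Dict.values, PySem.Dict.items_counter, List.map_map]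
  rw [pv_foldl_mul, pv_foldl_mul_pow]
  simp only [one_mul, List.map_map, Function.comp_def, Int.toNat_natCast]
  rw [pv_prod_regroup line.toList (fun el => (line.toList.count el : Int))]
  cases h : ((PySem.Set.ofList line.toList).map
      (fun x => (line.toList.count x : Int) ^ line.toList.count x)).prod == 27 <;> simp [h]

-- ===== VERDICT (by name: the statement is the Claim_ definition above) =====
theorem chpovt_spec : Claim_equal_chpovt := by
  intro line _
  exact chpovt_eq line
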